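-- pv_equiv track=rewrite | github.com/doctawho42/CompareAln | CompareAln.py | find_blocks
-- ===== SOURCE A (Python) =====
-- def find_blocks(pairs_lst):
--     blocks = []
--     start1, start2 = pairs_lst[0]
--     is_block = False
--     for i in range(len(pairs_lst) - 1):
--         if pairs_lst[i][0] == pairs_lst[i + 1][0] - 1 and pairs_lst[i][1] == pairs_lst[i + 1][1] - 1:
--             stop1, stop2 = pairs_lst[i + 1]
--             is_block = True  # Проверка, чтобы не записывать "блоки" из 1 пары
--         else:
--             if is_block:
--                 blocks.append(((start1, stop1), (start2, stop2)))
--                 start1, start2 = pairs_lst[i + 1]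
--                 is_block = False
--             else:
--                 start1, start2 = pairs_lst[i + 1]
--     if is_block:  # Это если вдруг есть блок в самом конце
--         blocks.append(((start1, stop1), (start2, stop2)))
--     return blocks
-- ===== SOURCE B (Python) =====
-- def find_blocks(pairs_lst):
--     # group the pairs into maximal +1/+1 runs, then emit endpoints of runs of length >= 2
--     runs = []
--     cur = []
--     for p in pairs_lst:
--         if cur and cur[-1][0] + 1 == p[0] and cur[-1][1] + 1 == p[1]:
--             cur.append(p)
--         else:
--             if cur:
--                 runs.append(cur)
--             cur = [p]
--     if cur:
--         runs.append(cur)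
--     return [((r[0][0], r[-1][0]), (r[0][1], r[-1][1])) for r in runs if len(r) >= 2]
-- ===== Notes on version B (the rewrite author's own statement) =====
-- stated objective: alternative
-- what changed: Replaces A's single sweep with an is_block flag and start/stop state variables by a group-then-extract decomposition: the pairs are first grouped into maximal +1/+1 runs, then a comprehension emits the endpoint pairs of every run of length >= 2.
-- crash fix: On the empty list A raises IndexError (it reads pairs_lst[0] unconditionally) while B returns []. — e.g. on find_blocks([]): A raises IndexError, B returns []
import Mathlib
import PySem

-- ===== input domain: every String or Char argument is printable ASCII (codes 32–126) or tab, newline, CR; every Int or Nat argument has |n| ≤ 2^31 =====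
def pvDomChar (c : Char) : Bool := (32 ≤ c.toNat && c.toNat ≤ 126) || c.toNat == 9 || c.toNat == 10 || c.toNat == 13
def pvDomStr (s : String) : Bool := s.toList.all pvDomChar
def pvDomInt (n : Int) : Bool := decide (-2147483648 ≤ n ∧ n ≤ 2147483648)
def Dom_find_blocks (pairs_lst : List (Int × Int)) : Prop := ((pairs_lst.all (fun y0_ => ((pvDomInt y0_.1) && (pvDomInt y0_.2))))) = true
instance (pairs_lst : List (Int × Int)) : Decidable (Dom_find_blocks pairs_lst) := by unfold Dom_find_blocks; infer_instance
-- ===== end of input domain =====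

-- B replaces A's is_block flag-state sweep by group-into-maximal-runs + extract-endpoints;
-- alternative decomposition, same O(n) cost. On the empty list A raises IndexError, B returns [].


-- ===== PORT A =====
-- A's for-loop over i in range(len-1): structural recursion over the remaining pairs,
-- carrying the previous element and the same state (blocks, start1, start2, stop1, stop2, is_block).
def findBlocksLoop (pairs : List (Int × Int)) (prev : Int × Int)
    (blocks : List ((Int × Int) × (Int × Int)))
    (start1 start2 stop1 stop2 : Int) (is_block : Bool) :
    List ((Int × Int) × (Int × Int)) :=
  match pairs with
  | [] => if is_block then blocks ++ [((start1, stop1), (start2, stop2))] else blocks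
  | nxt :: rest =>
    if prev.1 == nxt.1 - 1 && prev.2 == nxt.2 - 1 then
      findBlocksLoop rest nxt blocks start1 start2 nxt.1 nxt.2 true
    else
      if is_block then
        findBlocksLoop rest nxt (blocks ++ [((start1, stop1), (start2, stop2))]) nxt.1 nxt.2 stop1 stop2 false
      else
        findBlocksLoop rest nxt blocks nxt.1 nxt.2 stop1 stop2 false

def find_blocks (pairs_lst : List (Int × Int)) : List ((Int × Int) × (Int × Int)) :=
  match pairs_lst with
  | [] => []  -- Python raises IndexError at pairs_lst[0]; excluded by Pre_find_blocks
  | p0 :: rest => findBlocksLoop rest p0 [] p0.1 p0.2 0 0 false  -- stop1/stop2 unset in Python until first hit; read only when is_block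

-- ===== PORT B =====
def succStep (p q : Int × Int) : Bool := p.1 + 1 == q.1 && p.2 + 1 == q.2

-- one step of the grouping loop: state is (runs, cur)
def groupStep (st : List (List (Int × Int)) × List (Int × Int)) (p : Int × Int) :
    List (List (Int × Int)) × List (Int × Int) :=
  match st.2.getLast? with
  | some l => if succStep l p then (st.1, st.2 ++ [p]) else (st.1 ++ [st.2], [p])
  | none => (st.1, [p])

-- the final 'if cur: runs.append(cur)'
def finishRuns (st : List (List (Int × Int)) × List (Int × Int)) : List (List (Int × Int)) :=
  if st.2.isEmpty then st.1 else st.1 ++ [st.2]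

-- ((r[0][0], r[-1][0]), (r[0][1], r[-1][1]))
def blockOf (r : List (Int × Int)) : (Int × Int) × (Int × Int) :=
  (((r.headD (0, 0)).1, (r.getLastD (0, 0)).1), ((r.headD (0, 0)).2, (r.getLastD (0, 0)).2))

def find_blocks_alt (pairs_lst : List (Int × Int)) : List ((Int × Int) × (Int × Int)) :=
  ((finishRuns (pairs_lst.foldl groupStep ([], []))).filter (fun r => 2 ≤ r.length)).map blockOf

-- ===== PRECONDITION & SPEC =====
-- Pre_ excludes exactly the empty list, on which Python A raises IndexError.
def Pre_find_blocks (pairs_lst : List (Int × Int)) : Prop := pairs_lst ≠ []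
instance (pairs_lst : List (Int × Int)) : Decidable (Pre_find_blocks pairs_lst) := by unfold Pre_find_blocks; infer_instance
def pvWitness_find_blocks : (List (Int × Int)) := [(0, 5), (1, 6), (4, 8)]

-- On the empty list A raises IndexError (it reads pairs_lst[0] unconditionally) while B returns [].
def Raises_find_blocks (pairs_lst : List (Int × Int)) : Prop := pairs_lst = []
instance (pairs_lst : List (Int × Int)) : Decidable (Raises_find_blocks pairs_lst) := by unfold Raises_find_blocks; infer_instance
def pvRaiseWitness_find_blocks : (List (Int × Int)) := []
def pvRaiseWitnessOut_find_blocks : List ((Int × Int) × (Int × Int)) := []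

def Spec_find_blocks (pairs_lst : List (Int × Int)) (out : List ((Int × Int) × (Int × Int))) : Prop := out = find_blocks_alt pairs_lst
instance (pairs_lst : List (Int × Int)) (out : List ((Int × Int) × (Int × Int))) : Decidable (Spec_find_blocks pairs_lst out) := by unfold Spec_find_blocks; infer_instance

-- ===== CLAIM (what is proved, stated in full; the proofs are below) =====
def Claim_equal_find_blocks : Prop := ∀ (pairs_lst : List (Int × Int)), Dom_find_blocks pairs_lst → Pre_find_blocks pairs_lst → Spec_find_blocks pairs_lst (find_blocks pairs_lst)
def Claim_raises_find_blocks : Prop := (∀ (pairs_lst : List (Int × Int)), Dom_find_blocks pairs_lst → Raises_find_blocks pairs_lst → ¬ Pre_find_blocks pairs_lst) ∧ (Dom_find_blocks (pvRaiseWitness_find_blocks) ∧ Raises_find_blocks (pvRaiseWitness_find_blocks) ∧ find_blocks_alt (pvRaiseWitness_find_blocks) = pvRaiseWitnessOut_find_blocks)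

-- ===== LEMMAS AND PROOFS =====

-- A's adjacency test equals B's succStep.
theorem cond_eq (p q : Int × Int) :
    (p.1 == q.1 - 1 && p.2 == q.2 - 1) = succStep p q := by
  rw [Bool.eq_iff_iff]
  simp only [succStep, Bool.and_eq_true, beq_iff_eq]
  omega

-- extraction of the finished runs list
def extractRuns (runs : List (List (Int × Int))) : List ((Int × Int) × (Int × Int)) :=
  (runs.filter (fun r => 2 ≤ r.length)).map blockOf

theorem extractRuns_append (a b : List (List (Int × Int))) :
    extractRuns (a ++ b) = extractRuns a ++ extractRuns b := by
  simp [extractRuns]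

-- Main invariant: A's loop equals B's grouping, for a current run cur agreeing with A's state.
theorem loop_inv (pairs : List (Int × Int)) :
    ∀ (prev : Int × Int) (runs0 : List (List (Int × Int))) (cur : List (Int × Int))
      (s1 s2 st1 st2 : Int) (isb : Bool),
      cur.getLast? = some prev →
      cur.headD (0, 0) = (s1, s2) →
      (isb = true ↔ 2 ≤ cur.length) →
      (isb = true → st1 = prev.1 ∧ st2 = prev.2) →
      findBlocksLoop pairs prev (extractRuns runs0) s1 s2 st1 st2 isb
        = extractRuns (finishRuns (pairs.foldl groupStep (runs0, cur))) := by
  induction pairs with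
  | nil =>
    intro prev runs0 cur s1 s2 st1 st2 isb hlast hhead hlen hstop
    have hcur : cur ≠ [] := by intro h; simp [h] at hlast
    simp only [List.foldl_nil, finishRuns]
    rw [if_neg (by simpa [List.isEmpty_iff] using hcur)]
    rw [extractRuns_append]
    cases isb with
    | true =>
      obtain ⟨h1, h2⟩ := hstop rfl
      have h2le : 2 ≤ cur.length := hlen.mp rfl
      have : extractRuns [cur] = [blockOf cur] := by
        simp [extractRuns, List.filter, h2le]
      simp only [findBlocksLoop, if_true, this]
      have hl : cur.getLastD (0, 0) = prev := by
        simp [List.getLastD_eq_getLast?, hlast]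
      have hbl : blockOf cur = ((s1, prev.1), (s2, prev.2)) := by
        simp only [blockOf, hl, hhead]
      rw [hbl, h1, h2]
    | false =>
      have hlt : cur.length < 2 := by
        by_contra h
        exact absurd (hlen.mpr (by omega)) (by simp)
      have : extractRuns [cur] = [] := by
        simp only [extractRuns, List.filter]
        rw [decide_eq_false (by omega)]
        simp
      simp [findBlocksLoop, this]
  | cons nxt rest ih =>
    intro prev runs0 cur s1 s2 st1 st2 isb hlast hhead hlen hstop
    have hcur : cur ≠ [] := by intro h; simp [h] at hlast
    simp only [List.foldl_cons]
    have hgs : groupStep (runs0, cur) nxt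
        = if succStep prev nxt then (runs0, cur ++ [nxt]) else (runs0 ++ [cur], [nxt]) := by
      simp [groupStep, hlast]
    by_cases h : succStep prev nxt = true
    · rw [hgs, if_pos h]
      simp only [findBlocksLoop, cond_eq, h, if_true]
      exact ih nxt runs0 (cur ++ [nxt]) s1 s2 nxt.1 nxt.2 true
        (by simp)
        (by cases cur with
            | nil => exact absurd rfl hcur
            | cons a t => simpa using hhead)
        (by constructor <;> intro _
            · have := List.length_pos_iff.mpr hcur; simp; omega
            · rfl)
        (fun _ => ⟨rfl, rfl⟩)
    · have h' : succStep prev nxt = false := by simpa using h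
      rw [hgs, if_neg (by simp [h'])]
      cases isb with
      | true =>
        obtain ⟨h1, h2⟩ := hstop rfl
        have h2le : 2 ≤ cur.length := hlen.mp rfl
        have hl : cur.getLastD (0, 0) = prev := by
          simp [List.getLastD_eq_getLast?, hlast]
        have hbl : blockOf cur = ((s1, prev.1), (s2, prev.2)) := by
          simp only [blockOf, hl, hhead]
        simp only [findBlocksLoop, cond_eq, h', if_false, Bool.false_eq_true, if_true]
        have step : extractRuns runs0 ++ [((s1, st1), (s2, st2))] = extractRuns (runs0 ++ [cur]) := by
          rw [extractRuns_append]
          have : extractRuns [cur] = [blockOf cur] := by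
            simp [extractRuns, List.filter, h2le]
          rw [this, hbl, h1, h2]
        rw [step]
        exact ih nxt (runs0 ++ [cur]) [nxt] nxt.1 nxt.2 st1 st2 false
          (by simp) (by simp) (by simp) (by simp)
      | false =>
        simp only [findBlocksLoop, cond_eq, h', if_false, Bool.false_eq_true]
        have hlt : cur.length < 2 := by
          by_contra hc
          exact absurd (hlen.mpr (by omega)) (by simp)
        have step : extractRuns runs0 = extractRuns (runs0 ++ [cur]) := by
          rw [extractRuns_append]
          have : extractRuns [cur] = [] := by
            simp only [extractRuns, List.filter]
            rw [decide_eq_false (by omega)]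
            simp
          rw [this, List.append_nil]
        rw [step]
        exact ih nxt (runs0 ++ [cur]) [nxt] nxt.1 nxt.2 st1 st2 false
          (by simp) (by simp) (by simp) (by simp)

-- ===== VERDICT (by name: the statement is the Claim_ definition above) =====
theorem find_blocks_spec : Claim_equal_find_blocks := by
  intro pairs_lst _ hpre
  unfold Spec_find_blocks
  match pairs_lst with
  | [] => exact absurd rfl hpre
  | p0 :: rest =>
    show findBlocksLoop rest p0 [] p0.1 p0.2 0 0 false = find_blocks_alt (p0 :: rest)
    have h0 : groupStep ([], []) p0 = ([], [p0]) := by simp [groupStep]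
    have := loop_inv rest p0 [] [p0] p0.1 p0.2 0 0 false (by simp) (by simp) (by simp) (by simp)
    simpa [find_blocks_alt, extractRuns, h0] using this

-- find_blocks_raises: the crash-fix claim — Raises_ (empty input) lies outside Pre_, and B returns [] there.
theorem find_blocks_raises : Claim_raises_find_blocks := by
  unfold Claim_raises_find_blocks
  refine ⟨fun pairs_lst _ hr => by simp [Raises_find_blocks] at hr; simp [Pre_find_blocks, hr], by decide⟩

-- self-check extracted from the claim: B's port returns the stated value at the raise witness
theorem pvRaiseWitness_ok : find_blocks_alt pvRaiseWitness_find_blocks = pvRaiseWitnessOut_find_blocks :=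
  find_blocks_raises.2.2.2
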